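-- pv_equiv track=rewrite | github.com/emailkgnow/test | main.py | translate_letter
-- ===== SOURCE A (Python) =====
-- def get_letter_postion(letter):
--     "returns the position of the letter in the alphabet"
--
--     cap="ABCDEFGHIJKLMNOPQRSTUVWXYZ"
--     low="abcdefghijklmnopqrstuvwxyz"
--
--
--     n=range(1,27)
--
--     cap_table={x:y for x,y in zip(cap,n)}
--     low_table={x:y for x,y in zip(low,n)}
--
--     if letter in cap:
--         return cap_table[letter]
--     if letter in low:
--         return low_table[letter]
--
-- def translate_letter(letter):
--     "translates the letter using its position in the alphabet"
--
--     cap="ABCDEFGHIJKLMNOPQRSTUVWXYZ"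
--     low="abcdefghijklmnopqrstuvwxyz"
--
--     n=range(1,27)
--
--     #note that the below dict comps are the opposite of the ones in the get_letter_position as here I want to get
--     #  the letter
--     cap_table={x:y for x,y in zip(n,cap)}
--     low_table={x:y for x,y in zip(n,low)}
--     try:
--         letter_position = get_letter_postion(letter)
--         new_letter_position=0
--
--         if letter_position>13:
--             new_letter_position=letter_position - 13
--         else:
--             new_letter_position=letter_position + 13
--         new_letter=None
--         for l in letter:
--             if letter.isupper():
--                 return cap_table[new_letter_position]
--             if letter.islower():
--                 return low_table[new_letter_position]
--     except:
--         return letter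
-- ===== SOURCE B (Python) =====
-- def translate_letter(letter):
--     "translates the letter using its position in the alphabet"
--     if isinstance(letter, str) and len(letter) == 1 and letter.isascii() and letter.isalpha():
--         base = ord('A') if letter.isupper() else ord('a')
--         return chr((ord(letter) - base + 13) % 26 + base)
--     return letter
-- ===== Notes on version B (the rewrite author's own statement) =====
-- stated objective: simpler
-- what changed: Replaces the position-dictionary lookups and the try/except fall-through with a single guard and one closed-form arithmetic expression chr((ord(c)-base+13)%26+base).
import Mathlib
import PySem

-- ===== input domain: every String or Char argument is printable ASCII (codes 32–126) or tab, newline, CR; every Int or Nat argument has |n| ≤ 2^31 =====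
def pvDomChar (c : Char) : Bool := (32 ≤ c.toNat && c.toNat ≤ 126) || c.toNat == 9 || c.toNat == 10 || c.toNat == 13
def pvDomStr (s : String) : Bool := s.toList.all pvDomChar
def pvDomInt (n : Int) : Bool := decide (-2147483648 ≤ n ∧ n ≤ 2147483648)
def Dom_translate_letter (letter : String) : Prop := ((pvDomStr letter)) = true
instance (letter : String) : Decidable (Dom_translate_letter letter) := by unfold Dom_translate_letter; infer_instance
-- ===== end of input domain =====

-- B replaces A's position dictionaries and try/except fall-through with one closed-form
-- ROT13 arithmetic expression behind a single guard (objective: simpler).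

-- ===== PORT A =====
def pvAlphaCap : String := "ABCDEFGHIJKLMNOPQRSTUVWXYZ"
def pvAlphaLow : String := "abcdefghijklmnopqrstuvwxyz"

-- get_letter_postion; result: none = KeyError raised inside, some none = Python returned None,
-- some (some p) = returned position p.  'letter in cap' is Python substring membership.
def pvGetLetterPostion (letter : String) : Option (Option Int) :=
  let n := PySem.List.pyRange 1 27
  let cap_table : PySem.Dict String Int :=
    PySem.Dict.ofList ((pvAlphaCap.toList.map (fun c => String.ofList [c])).zip n)
  let low_table : PySem.Dict String Int :=
    PySem.Dict.ofList ((pvAlphaLow.toList.map (fun c => String.ofList [c])).zip n)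
  if PySem.Str.isIn letter pvAlphaCap then (cap_table.get? letter).map some
  else if PySem.Str.isIn letter pvAlphaLow then (low_table.get? letter).map some
  else some none

-- Python str.isupper()/str.islower(), ported by hand (exact on ASCII, where cased = alphabetic):
-- at least one cased character and no oppositely-cased one.
def pvStrIsupper (cs : List Char) : Bool :=
  cs.any PySem.Chars.isalpha && cs.all (fun c => !PySem.Chars.islower c)
def pvStrIslower (cs : List Char) : Bool :=
  cs.any PySem.Chars.isalpha && cs.all (fun c => !PySem.Chars.isupper c)

-- 'for l in letter: …'; result: none = KeyError on the table lookup, some none = loop fell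
-- through (Python returns None), some (some s) = returned the new letter.
def pvLoop (letter : String) (cap_table low_table : PySem.Dict Int String) (np : Int) :
    List Char → Option (Option String)
  | [] => some none
  | _ :: rest =>
      if pvStrIsupper letter.toList then
        match cap_table.get? np with
        | some s => some (some s)
        | none => none
      else if pvStrIslower letter.toList then
        match low_table.get? np with
        | some s => some (some s)
        | none => none
      else pvLoop letter cap_table low_table np rest

def translate_letter (letter : String) : String :=
  let n := PySem.List.pyRange 1 27
  let cap_table : PySem.Dict Int String :=
    PySem.Dict.ofList (n.zip (pvAlphaCap.toList.map (fun c => String.ofList [c])))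
  let low_table : PySem.Dict Int String :=
    PySem.Dict.ofList (n.zip (pvAlphaLow.toList.map (fun c => String.ofList [c])))
  match pvGetLetterPostion letter with
  | none => letter        -- KeyError inside the helper → except: return letter
  | some none => letter   -- letter_position is None, 'None > 13' raises TypeError → except: return letter
  | some (some p) =>
      let np : Int := if p > 13 then p - 13 else p + 13
      match pvLoop letter cap_table low_table np letter.toList with
      | none => letter        -- KeyError on the table lookup → except: return letter
      | some (some s) => s
      | some none => letter   -- loop fell through: Python returns None; unreachable, since a
                              -- position exists only for single-letter inputs, whose loop returns

-- ===== PORT B =====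
def translate_letter_alt (letter : String) : String :=
  match letter.toList with    -- len(letter) == 1
  | [c] =>
      if c.toNat ≤ 127 && PySem.Chars.isalpha c then   -- letter.isascii() and letter.isalpha()
        let base : Int := if PySem.Chars.isupper c then 65 else 97
        String.ofList [Char.ofNat (PySem.Int.mod ((c.toNat : Int) - base + 13) 26 + base).toNat]
      else letter
  | _ => letter

-- ===== PRECONDITION & SPEC =====
def Spec_translate_letter (letter : String) (out : String) : Prop := out = translate_letter_alt letter
instance (letter : String) (out : String) : Decidable (Spec_translate_letter letter out) := by unfold Spec_translate_letter; infer_instance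

-- ===== CLAIM (what is proved, stated in full; the proofs are below) =====
def Claim_equal_translate_letter : Prop := ∀ (letter : String), Dom_translate_letter letter → Spec_translate_letter letter (translate_letter letter)

-- ===== LEMMAS AND PROOFS =====

-- A string whose length is not 1 is never a key of the position dictionaries, so A falls
-- into the except branch (KeyError, or TypeError from comparing None) and returns the input.
theorem pvGetLetterPostion_len_ne_one (letter : String) (h : letter.toList.length ≠ 1) :
    pvGetLetterPostion letter = none ∨ pvGetLetterPostion letter = some none := by
  unfold pvGetLetterPostion
  have hcap : ∀ s ∈ (PySem.Dict.ofList ((pvAlphaCap.toList.map (fun c => String.ofList [c])).zip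
      (PySem.List.pyRange 1 27)) : PySem.Dict String Int).keys, s.toList.length = 1 := by decide
  have hlow : ∀ s ∈ (PySem.Dict.ofList ((pvAlphaLow.toList.map (fun c => String.ofList [c])).zip
      (PySem.List.pyRange 1 27)) : PySem.Dict String Int).keys, s.toList.length = 1 := by decide
  split_ifs with h1 h2
  · left
    have : (PySem.Dict.ofList ((pvAlphaCap.toList.map (fun c => String.ofList [c])).zip
        (PySem.List.pyRange 1 27)) : PySem.Dict String Int).get? letter = none := by
      rw [PySem.Dict.get?_eq_none_iff_contains]
      by_contra hcon
      have := (PySem.Dict.contains_iff_mem_keys _ _).mp (by simpa using hcon)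
      exact h (hcap letter this)
    simp [this]
  · left
    have : (PySem.Dict.ofList ((pvAlphaLow.toList.map (fun c => String.ofList [c])).zip
        (PySem.List.pyRange 1 27)) : PySem.Dict String Int).get? letter = none := by
      rw [PySem.Dict.get?_eq_none_iff_contains]
      by_contra hcon
      have := (PySem.Dict.contains_iff_mem_keys _ _).mp (by simpa using hcon)
      exact h (hlow letter this)
    simp [this]
  · right; rfl

theorem translate_letter_len_ne_one (letter : String) (h : letter.toList.length ≠ 1) :
    translate_letter letter = letter := by
  rcases pvGetLetterPostion_len_ne_one letter h with h' | h' <;>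
    simp [translate_letter, h']

theorem translate_letter_alt_len_ne_one (letter : String) (h : letter.toList.length ≠ 1) :
    translate_letter_alt letter = letter := by
  unfold translate_letter_alt
  rcases h' : letter.toList with _ | ⟨c, _ | ⟨d, t⟩⟩ <;> simp_all

-- The single-character agreement, checked by enumeration over all characters of the domain.
set_option maxRecDepth 4096 in
theorem pv_enum : ((List.range 128).all (fun n => !pvDomChar (Char.ofNat n) ||
    (translate_letter (String.ofList [Char.ofNat n]) ==
      translate_letter_alt (String.ofList [Char.ofNat n])))) = true := by decide

theorem translate_letter_single (c : Char) (h : pvDomChar c = true) :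
    translate_letter (String.ofList [c]) = translate_letter_alt (String.ofList [c]) := by
  have h128 : c.toNat < 128 := by
    unfold pvDomChar at h
    simp only [Bool.or_eq_true, Bool.and_eq_true, decide_eq_true_eq, beq_iff_eq] at h
    omega
  have := List.all_eq_true.mp pv_enum c.toNat (List.mem_range.mpr h128)
  rw [Char.ofNat_toNat] at this
  simp only [Bool.or_eq_true, Bool.not_eq_true', beq_iff_eq] at this
  rcases this with h' | h'
  · rw [h] at h'; cases h'
  · exact h'

-- ===== VERDICT (by name: the statement is the Claim_ definition above) =====
theorem translate_letter_spec : Claim_equal_translate_letter := by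
  intro letter hdom
  unfold Spec_translate_letter
  rcases hs : letter.toList with _ | ⟨c, _ | ⟨d, t⟩⟩
  · rw [translate_letter_len_ne_one letter (by rw [hs]; simp),
        translate_letter_alt_len_ne_one letter (by rw [hs]; simp)]
  · have : letter = String.ofList [c] := by rw [← hs, String.ofList_toList]
    subst this
    refine translate_letter_single c ?_
    unfold Dom_translate_letter pvDomStr at hdom
    rw [hs] at hdom
    simpa using hdom
  · rw [translate_letter_len_ne_one letter (by rw [hs]; simp),
        translate_letter_alt_len_ne_one letter (by rw [hs]; simp)]
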